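-- pv_equiv track=rewrite | github.com/flamionl/Projet-BAC1 | functions.py | sort_orders
-- ===== SOURCE A (Python) =====
-- def sort_orders (orders, team):
--     """ Sorts the orders of a player depending on the type of these orders
--
--     Parameters
--     ----------
--     orders : orders from the player (str)
--     team : name of the team (str)
--
--     Returns
--     -------
--     creation_orders : orders of creation of the player (list of str)
--     upgrade_orders : orders of upgrade of the player (list of str)
--     attack_orders : orders of attack of the player (list of str)
--     movement_orders : orders of deplacement of the player (list of str)
--     energy_absorption_orders : orders of energy absorption of the player (list of str)
--     energy_giving_orders : orders of energy giving of the player (list of str)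
--
--     Version
--     -------
--     specification : Mathis Huet (v.2 06/03/2020)
--     implementation : Mathis Huet (v.2 09/03/2020)
--     """
--
--     # Creating all the lists
--     creation_orders = []
--     upgrade_orders = []
--     attack_orders = []
--     movement_orders = []
--     energy_absorption_orders = []
--     energy_giving_orders = []
--
--     # Separating all the orders and putting them in a list
--     orders_list = orders.split()
--
--     # Sorting every order in the correct list
--     for order in orders_list:
--
--         if 'upgrade:' in order:
--             upgrade_orders.append(order)
--         elif '*' in order:
--             attack_orders.append(order)
--         elif '@' in order:
--             movement_orders.append(order)
--         elif '<' in order: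
--             energy_absorption_orders.append(order)
--         elif '>' in order:
--             energy_giving_orders.append(order)
--         elif ':' in order:
--             creation_orders.append(order)
--
--     # Adding the name of the team at the end of each non-empty list
--     for List in [creation_orders, upgrade_orders, attack_orders, movement_orders, energy_absorption_orders, energy_giving_orders]:
--         if List != []:
--             List.append(team)
--
--     return creation_orders, upgrade_orders, attack_orders, movement_orders, energy_absorption_orders, energy_giving_orders
-- ===== SOURCE B (Python) =====
-- MARKERS = ['upgrade:', '*', '@', '<', '>', ':']  # priority order
--
--
-- def sort_orders(orders, team):
--     """Six independent filter passes: each category takes the tokens containing its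
--     marker but none of the strictly higher-priority markers (priority peeling)."""
--     tokens = orders.split()
--     cats = []
--     higher = []
--     for marker in MARKERS:
--         cats.append([t for t in tokens
--                      if marker in t and not any(h in t for h in higher)])
--         higher.append(marker)
--     upgrade, attack, move, absorb, give, create = cats
--     tag = lambda lst: lst + [team] if lst else lst
--     return tag(create), tag(upgrade), tag(attack), tag(move), tag(absorb), tag(give)
-- ===== Notes on version B (the rewrite author's own statement) =====
-- stated objective: alternative
-- what changed: Replaces A's single pass with an if/elif chain filling six named lists by six independent filter passes over the token list, each selecting tokens that contain the category's marker and none of the strictly higher-priority markers (priority peeling), then tagging non-empty lists.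
import Mathlib
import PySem

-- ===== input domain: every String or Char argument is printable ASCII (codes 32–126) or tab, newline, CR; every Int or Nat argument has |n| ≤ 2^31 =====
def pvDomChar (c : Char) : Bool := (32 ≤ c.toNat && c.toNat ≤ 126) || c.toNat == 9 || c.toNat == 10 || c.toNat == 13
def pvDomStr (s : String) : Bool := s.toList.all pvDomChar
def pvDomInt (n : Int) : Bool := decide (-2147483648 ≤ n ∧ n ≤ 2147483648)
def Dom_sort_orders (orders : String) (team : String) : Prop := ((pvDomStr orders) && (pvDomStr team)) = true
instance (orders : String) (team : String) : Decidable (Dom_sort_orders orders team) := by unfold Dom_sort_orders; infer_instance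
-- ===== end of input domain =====

-- B replaces A's single dispatching pass over six named lists by six independent
-- priority-peeling filter passes over the token list (objective: alternative).

-- ===== PORT A =====
-- the body of A's for-loop: if/elif chain over the six markers, appending to the matching list
def pvStepA (st : List String × List String × List String × List String × List String × List String)
    (order : String) :
    List String × List String × List String × List String × List String × List String :=
  match st with
  | (c, u, a, m, e, g) =>
    if PySem.Str.isIn "upgrade:" order then (c, u ++ [order], a, m, e, g)
    else if PySem.Str.isIn "*" order then (c, u, a ++ [order], m, e, g)
    else if PySem.Str.isIn "@" order then (c, u, a, m ++ [order], e, g)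
    else if PySem.Str.isIn "<" order then (c, u, a, m, e ++ [order], g)
    else if PySem.Str.isIn ">" order then (c, u, a, m, e, g ++ [order])
    else if PySem.Str.isIn ":" order then (c ++ [order], u, a, m, e, g)
    else (c, u, a, m, e, g)

-- A's final loop: append team to each non-empty list
def pvFinA (team : String) (l : List String) : List String :=
  if l ≠ [] then l ++ [team] else l

def sort_orders (orders : String) (team : String) :
    List String × List String × List String × List String × List String × List String :=
  match (PySem.Str.split₀ orders).foldl pvStepA ([], [], [], [], [], []) with
  | (c, u, a, m, e, g) =>
    (pvFinA team c, pvFinA team u, pvFinA team a, pvFinA team m, pvFinA team e, pvFinA team g)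

-- ===== PORT B =====
def pvMarkers : List String := ["upgrade:", "*", "@", "<", ">", ":"]

-- Source B's comprehension: tokens containing `marker` but none of the higher-priority markers
def pvPick (tokens : List String) (marker : String) (higher : List String) : List String :=
  tokens.filter (fun t => PySem.Str.isIn marker t && !(higher.any (fun h => PySem.Str.isIn h t)))

-- Source B's tag lambda
def pvTag (team : String) (lst : List String) : List String :=
  if lst ≠ [] then lst ++ [team] else lst

def sort_orders_alt (orders : String) (team : String) :
    List String × List String × List String × List String × List String × List String :=
  let tokens := PySem.Str.split₀ orders
  -- the for-loop over pvMarkers accumulating (cats, higher)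
  let st := pvMarkers.foldl
    (fun (st : List (List String) × List String) marker =>
      (st.1 ++ [pvPick tokens marker st.2], st.2 ++ [marker])) ([], [])
  match st.1 with
  | [upgrade, attack, move, absorb, give, create] =>
    (pvTag team create, pvTag team upgrade, pvTag team attack,
     pvTag team move, pvTag team absorb, pvTag team give)
  | _ => ([], [], [], [], [], [])   -- unreachable: pvMarkers has six elements

-- ===== PRECONDITION & SPEC =====
def Spec_sort_orders (orders : String) (team : String) (out : List String × List String × List String × List String × List String × List String) : Prop := out = sort_orders_alt orders team
instance (orders : String) (team : String) (out : List String × List String × List String × List String × List String × List String) : Decidable (Spec_sort_orders orders team out) := by unfold Spec_sort_orders; infer_instance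

-- ===== CLAIM (what is proved, stated in full; the proofs are below) =====
def Claim_equal_sort_orders : Prop := ∀ (orders : String) (team : String), Dom_sort_orders orders team → Spec_sort_orders orders team (sort_orders orders team)

-- ===== LEMMAS AND PROOFS =====

-- A's fold, started from arbitrary lists, equals those lists extended by B's six filters
lemma pvFold_filter (ts : List String) :
    ∀ c u a m e g, ts.foldl pvStepA (c, u, a, m, e, g) =
      (c ++ pvPick ts ":" ["upgrade:", "*", "@", "<", ">"],
       u ++ pvPick ts "upgrade:" [],
       a ++ pvPick ts "*" ["upgrade:"],
       m ++ pvPick ts "@" ["upgrade:", "*"],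
       e ++ pvPick ts "<" ["upgrade:", "*", "@"],
       g ++ pvPick ts ">" ["upgrade:", "*", "@", "<"]) := by
  induction ts with
  | nil => intro c u a m e g; simp [pvPick]
  | cons t ts ih =>
    intro c u a m e g
    simp only [List.foldl_cons, pvStepA]
    split_ifs with h1 h2 h3 h4 h5 h6 <;>
      simp [ih, pvPick, List.filter_cons, *, -PySem.Str.isIn_eq]

theorem sort_orders_spec : Claim_equal_sort_orders := by
  intro orders team _
  unfold Spec_sort_orders sort_orders sort_orders_alt
  simp only [pvMarkers, List.foldl_cons, List.foldl_nil, List.nil_append,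
    List.cons_append, List.append_nil]
  rw [pvFold_filter]
  rfl
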